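-- pv_equiv track=rewrite | github.com/tberhanu/elts-of-coding | BST/most_visited_pages.py | most_visited_pages
-- ===== SOURCE A (Python) =====
-- from collections import Counter
--
-- def most_visited_pages(file):
--     """
--     Here's below a simpler solution of mine using hash table, but there is also another suggested
--     strategy using BST and Hash table on page 214.
--     :param file:
--     :return:
--     """
--     chars = file.split(",")
--     x = Counter(chars)
--     c = {k: v for k, v in sorted(x.items(), key=lambda item: item[1], reverse=True)}
--     result = []
--     for k, v in c.items():
--         result.append(k)
--     return result
-- ===== SOURCE B (Python) =====
-- def most_visited_pages(file):
--     pages = file.split(",")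
--     counts = {}
--     for p in pages:
--         counts[p] = counts.get(p, 0) + 1
--     buckets = {}
--     for p, c in counts.items():
--         buckets.setdefault(c, []).append(p)
--     out = []
--     for c in range(max(counts.values()), 0, -1):
--         out += buckets.get(c, [])
--     return out
-- ===== Notes on version B (the rewrite author's own statement) =====
-- stated objective: alternative
-- what changed: Replaces A's Counter + comparison sort of the (page, count) items by a counting/bucket approach: counts are accumulated in one dict pass, pages are grouped into buckets keyed by their count in first-appearance order, and the result is emitted by walking the counts from the maximum down to 1.
import Mathlib
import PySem

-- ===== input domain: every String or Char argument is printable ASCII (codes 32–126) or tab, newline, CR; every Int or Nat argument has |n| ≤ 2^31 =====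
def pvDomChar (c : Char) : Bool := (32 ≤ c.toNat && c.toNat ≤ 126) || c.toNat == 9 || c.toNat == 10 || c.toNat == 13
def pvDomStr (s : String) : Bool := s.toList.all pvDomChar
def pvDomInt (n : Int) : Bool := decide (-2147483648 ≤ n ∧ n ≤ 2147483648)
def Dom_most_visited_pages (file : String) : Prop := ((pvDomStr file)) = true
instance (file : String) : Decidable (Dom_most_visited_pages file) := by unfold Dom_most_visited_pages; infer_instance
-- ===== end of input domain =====

-- B replaces A's comparison sort of the Counter items by a bucket-by-count pass
-- (buckets filled in first-insertion order, emitted from the maximal count down): same result, different algorithm.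

-- ===== PORT A =====
-- file.split(","): the separator "," is non-empty, so PySem.Str.split? always returns some; .getD [] is an unreachable default
def most_visited_pages (file : String) : List String :=
  let chars := (PySem.Str.split? file ",").getD []
  let x := PySem.Dict.counter chars
  let c := PySem.Dict.ofList (PySem.List.sorted x.items (fun item => item.2) true)
  c.items.foldl (fun result kv => result ++ [kv.1]) []

-- ===== PORT B =====
-- max(counts.values()) could only raise on an empty dict, which split(",") never produces; the none branch is that unreachable case
def most_visited_pages_alt (file : String) : List String :=
  let pages := (PySem.Str.split? file ",").getD []
  let counts := pages.foldl (fun d p => d.insert p (d.getD p 0 + 1)) PySem.Dict.empty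
  let buckets := counts.items.foldl (fun d kv => PySem.Dict.modify d kv.2 ([] : List String) (· ++ [kv.1])) PySem.Dict.empty
  match PySem.List.max? counts.values (fun v => v) with
  | none => []
  | some m => (PySem.List.pyRange m 0 (-1)).foldl (fun out c => out ++ PySem.Dict.getD buckets c []) []

-- ===== PRECONDITION & SPEC =====
def Spec_most_visited_pages (file : String) (out : List String) : Prop := out = most_visited_pages_alt file
instance (file : String) (out : List String) : Decidable (Spec_most_visited_pages file out) := by unfold Spec_most_visited_pages; infer_instance

-- ===== CLAIM (what is proved, stated in full; the proofs are below) =====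
def Claim_equal_most_visited_pages : Prop := ∀ (file : String), Dom_most_visited_pages file → Spec_most_visited_pages file (most_visited_pages file)

-- ===== LEMMAS AND PROOFS =====

-- inserting past a prefix none of whose elements trigger `before`
theorem pv_insertBy_append {α : Type} (before : α → α → Bool) (x : α) (ys zs : List α)
    (h : ∀ y ∈ ys, before x y = false) :
    PySem.List.insertBy before x (ys ++ zs) = ys ++ PySem.List.insertBy before x zs := by
  induction ys with
  | nil => simp
  | cons y ys ih =>
    simp only [List.cons_append, PySem.List.insertBy, h y (by simp)]
    simp only [Bool.false_eq_true, if_false, List.cons.injEq, true_and]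
    exact ih (fun y hy => h y (by simp [hy]))

-- inserting in front of a list whose every element triggers `before`
theorem pv_insertBy_front {α : Type} (before : α → α → Bool) (x : α) (zs : List α)
    (h : ∀ z ∈ zs, before x z = true) :
    PySem.List.insertBy before x zs = x :: zs := by
  cases zs with
  | nil => rfl
  | cons z zs => simp [PySem.List.insertBy, h z (by simp)]

-- inserting one pair into the bucket concatenation lands at the end of its own bucket
theorem pv_insert_bucket (x : String × Int) (l : List (String × Int)) (cs : List Int)
    (hcs : cs.Pairwise (· > ·)) (hx : x.2 ∈ cs) :
    PySem.List.insertBy (fun a b => decide (b.2 < a.2)) x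
        (cs.flatMap (fun c => l.filter (fun p => p.2 == c)))
      = cs.flatMap (fun c => (l ++ [x]).filter (fun p => p.2 == c)) := by
  induction cs with
  | nil => cases hx
  | cons c cs ih =>
    rcases List.pairwise_cons.mp hcs with ⟨hgt, hcs'⟩
    simp only [List.flatMap_cons, List.filter_append]
    by_cases hxc : x.2 = c
    · rw [pv_insertBy_append _ _ _ _ (by
        intro y hy
        have : y.2 = c := by simpa using (List.of_mem_filter hy)
        simp [this, hxc])]
      rw [pv_insertBy_front _ _ _ (by
        intro z hz
        rcases List.mem_flatMap.mp hz with ⟨c', hc', hz'⟩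
        have : z.2 = c' := by simpa using (List.of_mem_filter hz')
        have : z.2 < x.2 := by rw [this, hxc]; exact hgt c' hc'
        simpa using this)]
      have htail : cs.flatMap (fun c' => l.filter (fun p => p.2 == c') ++ List.filter (fun p => p.2 == c') [x])
          = cs.flatMap (fun c' => l.filter (fun p => p.2 == c')) := by
        apply List.flatMap_congr
        intro c' hc'
        have hne : (x.2 == c') = false := by
          simp only [beq_eq_false_iff_ne, ne_eq]
          rw [hxc]; exact (ne_of_gt (hgt c' hc'))
        simp [hne]
      rw [htail]
      have hone : List.filter (fun p => p.2 == c) [x] = [x] := by simp [List.filter, hxc]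
      simp [hone]
    · have hx' : x.2 ∈ cs := by cases hx with
        | head => exact absurd rfl hxc
        | tail _ h => exact h
      have hlt : x.2 < c := hgt _ hx'
      rw [pv_insertBy_append _ _ _ _ (by
        intro y hy
        have : y.2 = c := by simpa using (List.of_mem_filter hy)
        simp [this]; omega)]
      rw [ih hcs' hx']
      have hzero : List.filter (fun p => p.2 == c) [x] = [] := by
        have hne : (x.2 == c) = false := by
          simp only [beq_eq_false_iff_ne, ne_eq]; omega
        simp [hne]
      simp [hzero]

-- stable descending sort by the Int component is the concatenation of its value buckets
theorem pv_sorted_buckets (l : List (String × Int)) (cs : List Int)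
    (hcs : cs.Pairwise (· > ·)) (hmem : ∀ p ∈ l, p.2 ∈ cs) :
    PySem.List.sorted l (fun p => p.2) true = cs.flatMap (fun c => l.filter (fun p => p.2 == c)) := by
  induction l using List.reverseRecOn with
  | nil => simp [PySem.List.sorted_rev_eq_foldl_insertBy]
  | append_singleton l x ih =>
    rw [PySem.List.sorted_rev_eq_foldl_insertBy, List.foldl_append, List.foldl_cons, List.foldl_nil,
      ← PySem.List.sorted_rev_eq_foldl_insertBy]
    rw [ih (fun p hp => hmem p (by simp [hp]))]
    exact pv_insert_bucket x l cs hcs (hmem x (by simp))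

-- Dict.update on fresh, pairwise-distinct keys appends the pairs as given
theorem pv_update_items {ν : Type} (ps : List (String × ν)) (d : PySem.Dict String ν)
    (hnd : (ps.map Prod.fst).Nodup) (hfresh : ∀ p ∈ ps, d.contains p.1 = false) :
    (d.update ps).items = d.items ++ ps := by
  induction ps generalizing d with
  | nil => simp [PySem.Dict.update]
  | cons p ps ih =>
    simp only [List.map_cons, List.nodup_cons] at hnd
    have hins : (d.insert p.1 p.2).items = d.items ++ [p] := by
      rw [PySem.Dict.items_insert, hfresh p (by simp)]
      simp
    have : (d.update (p :: ps)) = ((d.insert p.1 p.2).update ps) := rfl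
    rw [this, ih _ hnd.2 (by
      intro q hq
      have hne : p.1 ≠ q.1 := by
        intro h
        exact hnd.1 (h ▸ List.mem_map_of_mem hq)
      simp only [PySem.Dict.contains, hins, List.any_append]
      have h1 : d.items.any (fun r => r.1 == q.1) = false := hfresh q (by simp [hq])
      simp [h1, hne])]
    simp [hins]

theorem pv_items_ofList {ν : Type} (ps : List (String × ν)) (hnd : (ps.map Prod.fst).Nodup) :
    (PySem.Dict.ofList ps).items = ps := by
  have := pv_update_items ps PySem.Dict.empty hnd (by intro p _; rfl)
  simpa [PySem.Dict.ofList, PySem.Dict.empty] using this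

-- the core equivalence, over the split pieces
theorem pv_core (chars : List String) :
    (PySem.Dict.ofList (PySem.List.sorted (PySem.Dict.counter chars).items (fun item => item.2) true)).items.foldl
        (fun result kv => result ++ [kv.1]) []
      = (let counts := chars.foldl (fun d p => d.insert p (d.getD p 0 + 1)) PySem.Dict.empty
         let buckets := counts.items.foldl (fun d kv => PySem.Dict.modify d kv.2 ([] : List String) (· ++ [kv.1])) PySem.Dict.empty
         match PySem.List.max? counts.values (fun v => v) with
         | none => []
         | some m => (PySem.List.pyRange m 0 (-1)).foldl (fun out c => out ++ PySem.Dict.getD buckets c []) []) := by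
  simp only [PySem.Dict.foldl_insert_getD_add_one_eq_counter]
  set items := (PySem.Dict.counter chars).items with hitems
  -- A's trailing loop is map fst; B's bucket dict lookup is a filter of items
  rw [show List.foldl (fun (result : List String) (kv : String × Int) => result ++ [kv.1]) []
        (PySem.Dict.ofList (PySem.List.sorted items (fun item => item.2) true)).items
      = [] ++ ((PySem.Dict.ofList (PySem.List.sorted items (fun item => item.2) true)).items.map (fun kv => kv.1))
    from PySem.List.foldl_append_singleton_eq_map _ _ _, List.nil_append]
  have hnodupS : (items.map Prod.fst).Nodup := by
    rw [hitems]
    exact PySem.Dict.nodup_keys_counter chars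
  have hbucket : ∀ c : Int,
      PySem.Dict.getD (items.foldl (fun d kv => PySem.Dict.modify d kv.2 ([] : List String) (· ++ [kv.1])) PySem.Dict.empty) c []
        = (items.filter (fun p => p.2 == c)).map (fun kv => kv.1) := by
    intro c
    rw [show (items.foldl (fun d kv => PySem.Dict.modify d kv.2 ([] : List String) (· ++ [kv.1])) PySem.Dict.empty)
        = ((items.map (fun kv => (kv.2, kv.1))).foldl (fun d p => PySem.Dict.modify d p.1 ([] : List String) (· ++ [p.2])) PySem.Dict.empty)
      from (List.foldl_map (f := fun kv : String × Int => (kv.2, kv.1))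
        (g := fun d p => PySem.Dict.modify d p.1 ([] : List String) (· ++ [p.2]))
        (l := items) (init := PySem.Dict.empty)).symm]
    rw [PySem.Dict.getD_foldl_modify_append]
    rw [List.filter_map]
    simp only [List.map_map]
    show [] ++ _ = _
    rw [List.nil_append]
    rfl
  cases hmax : PySem.List.max? ((PySem.Dict.counter chars).values) (fun v => v) with
  | none =>
    have : (PySem.Dict.counter chars).values = [] := (PySem.List.max?_eq_none_iff _ _).mp hmax
    have hitnil : items = [] := by
      rw [hitems]
      have := congrArg List.length this
      simpa [PySem.Dict.values] using this
    simp [hitnil, PySem.List.sorted_rev_eq_foldl_insertBy, PySem.Dict.ofList, PySem.Dict.update, PySem.Dict.empty]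
  | some m =>
    show _ = List.foldl (fun out c => out ++ PySem.Dict.getD
      (items.foldl (fun d kv => PySem.Dict.modify d kv.2 ([] : List String) (· ++ [kv.1])) PySem.Dict.empty) c [])
      [] (PySem.List.pyRange m 0 (-1))
    have hub : ∀ v ∈ (PySem.Dict.counter chars).values, v ≤ m := by
      intro v hv
      exact PySem.List.max?_isMax hmax v hv
    -- bucket list of counts, strictly decreasing
    have hcs : (PySem.List.pyRange m 0 (-1)).Pairwise (· > ·) := by
      rw [PySem.List.pyRange_neg_one]
      rw [List.pairwise_map]
      apply List.Pairwise.imp ?_ (List.pairwise_lt_range)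
      intro a b hab
      omega
    have hmem : ∀ p ∈ items, p.2 ∈ PySem.List.pyRange m 0 (-1) := by
      intro p hp
      rw [PySem.List.mem_pyRange_neg_one]
      constructor
      · rw [hitems, PySem.Dict.items_counter] at hp
        rcases List.mem_map.mp hp with ⟨k, hk, rfl⟩
        have : k ∈ chars := (PySem.Set.mem_ofList chars k).mp hk
        have := List.count_pos_iff.mpr this
        simp
        omega
      · apply hub
        simp only [PySem.Dict.values]
        rw [← hitems]
        exact List.mem_map.mpr ⟨p, hp, rfl⟩
    -- A's dict comprehension keeps the sorted items as they are
    have hsortnodup : ((PySem.List.sorted items (fun item => item.2) true).map Prod.fst).Nodup := by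
      rw [(List.Perm.map Prod.fst (PySem.List.sorted_perm items (fun item => item.2) true)).nodup_iff]
      exact hnodupS
    rw [pv_items_ofList _ hsortnodup]
    rw [pv_sorted_buckets items _ hcs hmem]
    rw [List.map_flatMap]
    rw [PySem.List.foldl_append_eq_flatMap, List.nil_append]
    exact List.flatMap_congr (fun c _ => (hbucket c).symm)

-- ===== VERDICT (by name: the statement is the Claim_ definition above) =====
theorem most_visited_pages_spec : Claim_equal_most_visited_pages := by
  intro file _
  unfold Spec_most_visited_pages most_visited_pages most_visited_pages_alt
  exact pv_core ((PySem.Str.split? file ",").getD [])
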